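-- pv_equiv track=rewrite | github.com/Ashiq-am/Path-of-Python | 3.Data Types/Arrays Set 1 and Set 2/Prefix Sum/Find partitions to maximize even and odd count sum in left and right part/Find partitions to maximize even and odd count sum in left and right part.py | solve
-- ===== SOURCE A (Python) =====
-- def solve(vect):
--
-- 	# To keep the track
-- 	# of final answer
-- 	maximumSum = 0
--
-- 	# Size of nums
-- 	n = len(vect)
--
-- 	# It keeps the track
-- 	# of final answer
-- 	ans = []
--
-- 	# Iterate over the indices
-- 	for i in range(1, n):
--
-- 		# Stores the count of even
-- 		# numbers in the left subarray
-- 		countEven = 0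
--
-- 		# Iterate in the left subarray
-- 		for j in range(i-1, -1, -1):
-- 			if (vect[j] % 2 == 0):
-- 				countEven += 1
--
-- 		# Stores the count of even
-- 		# numbers in the left subarray
-- 		countOdd = 0
--
-- 		# Iterate in the right subarray
-- 		for j in range(i, n):
-- 			if (vect[j] % 2 == 1):
-- 				countOdd += 1
--
-- 		# Stores the sum for current i
-- 		sum = countEven + countOdd
--
-- 		# If current score
-- 		# is greater than
-- 		# previous then push
-- 		# in the ans array.
-- 		if (sum > maximumSum):
-- 			ans = [i]
-- 			maximumSum = sum
--
-- 		# If sum is equal to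
-- 		# maximum sum then
-- 		# consider the index i
-- 		# with previous max
-- 		elif (sum == maximumSum):
-- 			ans.append(i)
--
-- 	return ans
-- ===== SOURCE B (Python) =====
-- def solve(vect):
--     n = len(vect)
--     odd_right = sum(1 for x in vect if x % 2 == 1)
--     even_left = 0
--     best = 0
--     ans = []
--     for i in range(1, n):
--         x = vect[i - 1]
--         if x % 2 == 0:
--             even_left += 1
--         else:
--             odd_right -= 1
--         s = even_left + odd_right
--         if s > best:
--             best = s
--             ans = [i]
--         elif s == best:
--             ans.append(i)
--     return ans
-- ===== Notes on version B (the rewrite author's own statement) =====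
-- stated objective: faster
-- what changed: B replaces A's per-index rescans of the whole left and right subarrays by one precomputed total odd count and two running counters updated incrementally in a single pass.
import Mathlib
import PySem

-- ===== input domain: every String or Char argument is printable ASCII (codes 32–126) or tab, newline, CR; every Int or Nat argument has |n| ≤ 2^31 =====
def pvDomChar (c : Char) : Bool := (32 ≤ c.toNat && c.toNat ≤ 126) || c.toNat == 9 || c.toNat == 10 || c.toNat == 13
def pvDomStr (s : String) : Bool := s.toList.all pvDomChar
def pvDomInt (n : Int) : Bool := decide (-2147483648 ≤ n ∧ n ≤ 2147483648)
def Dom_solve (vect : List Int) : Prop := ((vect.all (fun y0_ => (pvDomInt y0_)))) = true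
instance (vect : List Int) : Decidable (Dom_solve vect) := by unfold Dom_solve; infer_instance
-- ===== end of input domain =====

-- B replaces A's per-index rescans of the left and right subarrays by one precomputed odd
-- count and two running counters updated incrementally in a single pass.

-- ===== PORT A =====
-- the indices j in both inner loops are always in range, so pyGetD with default 0 is exact
def solve (vect : List Int) : List Int :=
  let n : Int := PySem.List.len vect
  ((PySem.List.pyRange 1 n 1).foldl (fun (st : Int × List Int) i =>
      let countEven := (PySem.List.pyRange (i - 1) (-1) (-1)).foldl
        (fun c j => if PySem.Int.mod (PySem.List.pyGetD vect j 0) 2 = 0 then c + 1 else c) (0 : Int)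
      let countOdd := (PySem.List.pyRange i n 1).foldl
        (fun c j => if PySem.Int.mod (PySem.List.pyGetD vect j 0) 2 = 1 then c + 1 else c) (0 : Int)
      let s := countEven + countOdd
      if s > st.1 then (s, [i])
      else if s = st.1 then (st.1, st.2 ++ [i])
      else st)
    ((0 : Int), ([] : List Int))).2

-- ===== PORT B =====
-- the index i-1 is always in range, so pyGetD with default 0 is exact
def solve_alt (vect : List Int) : List Int :=
  let n : Int := PySem.List.len vect
  let oddRight0 : Int := vect.foldl (fun c x => if PySem.Int.mod x 2 = 1 then c + 1 else c) 0
  ((PySem.List.pyRange 1 n 1).foldl (fun (st : Int × Int × Int × List Int) i =>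
      let x := PySem.List.pyGetD vect (i - 1) 0
      let el := if PySem.Int.mod x 2 = 0 then st.1 + 1 else st.1
      let orr := if PySem.Int.mod x 2 = 0 then st.2.1 else st.2.1 - 1
      let s := el + orr
      if s > st.2.2.1 then (el, orr, s, [i])
      else if s = st.2.2.1 then (el, orr, st.2.2.1, st.2.2.2 ++ [i])
      else (el, orr, st.2.2.1, st.2.2.2))
    ((0 : Int), oddRight0, (0 : Int), ([] : List Int))).2.2.2

-- ===== PRECONDITION & SPEC =====
def Spec_solve (vect : List Int) (out : List Int) : Prop := out = solve_alt vect
instance (vect : List Int) (out : List Int) : Decidable (Spec_solve vect out) := by unfold Spec_solve; infer_instance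

-- ===== CLAIM (what is proved, stated in full; the proofs are below) =====
def Claim_equal_solve : Prop := ∀ (vect : List Int), Dom_solve vect → Spec_solve vect (solve vect)

-- ===== LEMMAS AND PROOFS =====

theorem mpt (vect : List Int) (m : Nat) (hm : m ≤ vect.length) :
    (PySem.List.pyRange 0 (m:Int) 1).map (fun j => PySem.List.pyGetD vect j 0) = vect.take m := by
  induction m with
  | zero => simp [PySem.List.pyRange_one_eq_nil]
  | succ k ih =>
    have hk : k ≤ vect.length := Nat.le_of_succ_le hm
    have hlt : k < vect.length := hm
    have h1 : ((k:Int)+1) = ((k+1:Nat):Int) := by push_cast; ring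
    rw [← h1, PySem.List.pyRange_one_succ_right (by positivity), List.map_append, ih hk,
      List.take_add_one]
    rw [List.map_singleton, PySem.List.pyGetD_natCast, List.getD_eq_getElem?_getD,
      List.getElem?_eq_getElem hlt]
    rfl

def evC (xs : List Int) : Int := (xs.countP (fun x => decide (PySem.Int.mod x 2 = 0)) : Int)

def odC (xs : List Int) : Int := (xs.countP (fun x => decide (PySem.Int.mod x 2 = 1)) : Int)

theorem lemA_even (vect : List Int) (i : Int) (h0 : 0 ≤ i) (hn : i ≤ vect.length) :
    (PySem.List.pyRange (i - 1) (-1) (-1)).foldl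
      (fun c j => if PySem.Int.mod (PySem.List.pyGetD vect j 0) 2 = 0 then c + 1 else c) (0 : Int)
    = evC (vect.take i.toNat) := by
  have hr : PySem.List.pyRange (i-1) (-1) (-1) = (PySem.List.pyRange 0 i).reverse := by
    rw [PySem.List.pyRange_neg_one_eq_reverse]; norm_num
  rw [hr, PySem.List.foldl_ite_add_one (fun j => PySem.Int.mod (PySem.List.pyGetD vect j 0) 2 = 0),
    List.countP_reverse]
  have hcast : (i.toNat : Int) = i := Int.toNat_of_nonneg h0
  have hmt : i.toNat ≤ vect.length := by omega
  have := mpt vect i.toNat hmt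
  rw [hcast] at this
  rw [evC, ← this, List.countP_map]
  simp [Function.comp_def]

theorem lemA_odd (vect : List Int) (i : Int) (h0 : 0 ≤ i) :
    (PySem.List.pyRange i (vect.length : Int) 1).foldl
      (fun c j => if PySem.Int.mod (PySem.List.pyGetD vect j 0) 2 = 1 then c + 1 else c) (0 : Int)
    = odC (vect.drop i.toNat) := by
  rw [PySem.List.foldl_pyRange_pyGetD' vect 0
    (fun c x => if PySem.Int.mod x 2 = 1 then c + 1 else c) 0 h0,
    PySem.List.foldl_ite_add_one (fun x => PySem.Int.mod x 2 = 1), odC]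
  simp

def score (vect : List Int) (i : Int) : Int :=
  evC (vect.take i.toNat) + odC (vect.drop i.toNat)

def selStep (g : Int → Int) (st : Int × List Int) (i : Int) : Int × List Int :=
  let s := g i
  if s > st.1 then (s, [i]) else if s = st.1 then (st.1, st.2 ++ [i]) else st

theorem solve_eq_sel (vect : List Int) :
    solve vect = ((PySem.List.pyRange 1 (vect.length : Int) 1).foldl (selStep (score vect))
      ((0 : Int), ([] : List Int))).2 := by
  unfold solve
  simp only [PySem.List.len_eq]
  congr 1
  apply PySem.List.foldl_congr_mem
  intro st i hi
  rw [PySem.List.mem_pyRange_one] at hi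
  obtain ⟨h1, h2⟩ := hi
  simp only [lemA_even vect i (by omega) (le_of_lt h2), lemA_odd vect i (by omega)]
  rfl

theorem Bloop (vect : List Int) (k : Nat) (hk : 1 ≤ k) (st : Int × List Int) :
    ((PySem.List.pyRange (k : Int) (vect.length : Int) 1).foldl
      (fun (st : Int × Int × Int × List Int) i =>
        let x := PySem.List.pyGetD vect (i - 1) 0
        let el := if PySem.Int.mod x 2 = 0 then st.1 + 1 else st.1
        let orr := if PySem.Int.mod x 2 = 0 then st.2.1 else st.2.1 - 1
        let s := el + orr
        if s > st.2.2.1 then (el, orr, s, [i])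
        else if s = st.2.2.1 then (el, orr, st.2.2.1, st.2.2.2 ++ [i])
        else (el, orr, st.2.2.1, st.2.2.2))
      (evC (vect.take (k - 1)), odC (vect.drop (k - 1)), st.1, st.2)).2.2
    = (PySem.List.pyRange (k : Int) (vect.length : Int) 1).foldl (selStep (score vect)) st := by
  rcases le_or_gt ((vect.length : Int)) (k : Int) with h | h
  · rw [PySem.List.pyRange_one_eq_nil h]; simp
  · have hklen : k < vect.length := by exact_mod_cast h
    obtain ⟨m, rfl⟩ : ∃ m, k = m + 1 := ⟨k - 1, by omega⟩
    have hm1 : m < vect.length := by omega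
    simp only [Nat.add_sub_cancel]
    rw [PySem.List.pyRange_one_cons h]
    simp only [List.foldl_cons]
    have hx : PySem.List.pyGetD vect (((m + 1 : Nat) : Int) - 1) 0 = vect[m] := by
      have h2 : ((m + 1 : Nat) : Int) - 1 = ((m : Nat) : Int) := by push_cast; ring
      rw [h2, PySem.List.pyGetD_natCast, List.getD_eq_getElem?_getD,
        List.getElem?_eq_getElem hm1, Option.getD_some]
    have htake : vect.take (m + 1) = vect.take m ++ [vect[m]] := by
      rw [List.take_add_one, List.getElem?_eq_getElem hm1]
      rfl
    have hdrop : vect.drop m = vect[m] :: vect.drop (m + 1) := List.drop_eq_getElem_cons hm1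
    have hel : (if PySem.Int.mod (vect[m]) 2 = 0 then evC (vect.take m) + 1
        else evC (vect.take m)) = evC (vect.take (m + 1)) := by
      rcases PySem.Int.mod_two_eq (vect[m]) with hmm | hmm
      · rw [if_pos hmm]
        simp only [evC, htake, List.countP_append, List.countP_cons, List.countP_nil, hmm]
        norm_num
      · rw [if_neg (by omega)]
        simp only [evC, htake, List.countP_append, List.countP_cons, List.countP_nil, hmm]
        norm_num
    have hor : (if PySem.Int.mod (vect[m]) 2 = 0 then odC (vect.drop m)
        else odC (vect.drop m) - 1) = odC (vect.drop (m + 1)) := by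
      rcases PySem.Int.mod_two_eq (vect[m]) with hmm | hmm
      · rw [if_pos hmm]
        simp only [odC, hdrop, List.countP_cons, hmm]
        norm_num
      · rw [if_neg (by omega)]
        simp only [odC, hdrop, List.countP_cons, hmm]
        norm_num
    have hscore : score vect ((m + 1 : Nat) : Int) = evC (vect.take (m + 1)) + odC (vect.drop (m + 1)) := by
      simp [score]
    have hIH := fun st' => Bloop vect (m + 2) (by omega) st'
    have hcast : ((m + 1 : Nat) : Int) + 1 = ((m + 2 : Nat) : Int) := by push_cast; ring
    simp only [hx, hel, hor]
    rw [hcast]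
    have hs' : score vect (((m + 1 : Nat)) : Int) = evC (vect.take (m + 1)) + odC (vect.drop (m + 1)) := hscore
    by_cases hgt : evC (vect.take (m + 1)) + odC (vect.drop (m + 1)) > st.1
    · simp only [if_pos hgt]
      have h5 := hIH ((evC (vect.take (m + 1)) + odC (vect.drop (m + 1))), [((m + 1 : Nat) : Int)])
      dsimp only at h5
      rw [show m + 2 - 1 = m + 1 from rfl] at h5
      rw [h5]
      simp only [selStep, hs']
      rw [if_pos hgt]
    · by_cases heq : evC (vect.take (m + 1)) + odC (vect.drop (m + 1)) = st.1
      · simp only [if_neg hgt, if_pos heq]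
        have h5 := hIH (st.1, st.2 ++ [((m + 1 : Nat) : Int)])
        dsimp only at h5
        rw [show m + 2 - 1 = m + 1 from rfl] at h5
        rw [h5]
        simp only [selStep, hs']
        rw [if_neg hgt, if_pos heq]
      · simp only [if_neg hgt, if_neg heq]
        have h5 := hIH (st.1, st.2)
        dsimp only at h5
        rw [show m + 2 - 1 = m + 1 from rfl] at h5
        rw [h5]
        simp only [selStep, hs']
        rw [if_neg hgt, if_neg heq]
termination_by vect.length - k

theorem solve_alt_eq_sel (vect : List Int) :
    solve_alt vect = ((PySem.List.pyRange 1 (vect.length : Int) 1).foldl (selStep (score vect))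
      ((0 : Int), ([] : List Int))).2 := by
  unfold solve_alt
  simp only [PySem.List.len_eq]
  have hodd : vect.foldl (fun c x => if PySem.Int.mod x 2 = 1 then c + 1 else c) 0 = odC vect := by
    rw [PySem.List.foldl_ite_add_one (fun x => PySem.Int.mod x 2 = 1)]
    simp [odC]
  rw [hodd]
  have h := Bloop vect 1 (le_refl 1) ((0 : Int), ([] : List Int))
  dsimp only at h
  rw [show (1 : Nat) - 1 = 0 from rfl] at h
  simp only [List.take_zero, List.drop_zero, Nat.cast_one] at h
  rw [show evC ([] : List Int) = 0 from rfl] at h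
  rw [h]

-- ===== VERDICT (by name: the statement is the Claim_ definition above) =====
theorem solve_spec : Claim_equal_solve := by
  intro vect _
  unfold Spec_solve
  rw [solve_eq_sel, solve_alt_eq_sel]
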